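-- pv_equiv track=rewrite | github.com/TheMusicDistrict/Powerball-Analysis | Seeds.py | calculate_draw_signature
-- ===== SOURCE A (Python) =====
-- def calculate_draw_signature(whites, powerball):
--     """
--     Create a unique numerical signature for each draw.
--     This signature can be treated like a 'virtual seed'.
--     """
--     signatures = {}
--
--     # Signature 1: Sum-based
--     signatures["sum_signature"] = sum(whites) + powerball
--
--     # Signature 2: Range spread
--     signatures["spread_signature"] = max(whites) - min(whites)
--
--     # Signature 3: Odd/Even pattern (binary encoding)
--     odd_even = sum([2**i for i, n in enumerate(whites) if n % 2 == 1])
--     signatures["odd_even_signature"] = odd_even + (32 if powerball % 2 == 1 else 0)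
--
--     # Signature 4: Low/High pattern (below/above 35)
--     low_high = sum([2**i for i, n in enumerate(whites) if n > 35])
--     signatures["low_high_signature"] = low_high + (32 if powerball > 13 else 0)
--
--     # Signature 5: Prime number pattern
--     def is_prime(n):
--         if n < 2:
--             return False
--         for i in range(2, int(n**0.5) + 1):
--             if n % i == 0:
--                 return False
--         return True
--
--     primes = sum([2**i for i, n in enumerate(whites) if is_prime(n)])
--     signatures["prime_signature"] = primes + (32 if is_prime(powerball) else 0)
--
--     # Signature 6: Digit sum pattern
--     digit_sums = [sum(int(d) for d in str(n)) for n in whites]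
--     signatures["digit_sum_signature"] = sum(digit_sums) + sum(
--         int(d) for d in str(powerball)
--     )
--
--     # Signature 7: Sequential pairs (consecutive numbers)
--     sorted_w = sorted(whites)
--     sequential_count = sum([1 for i in range(4) if sorted_w[i + 1] - sorted_w[i] == 1])
--     signatures["sequential_signature"] = sequential_count * 20 + (powerball % 10)
--
--     # Signature 8: Modulo pattern (mod 10)
--     mod_pattern = sum([(n % 10) * (10**i) for i, n in enumerate(whites)])
--     signatures["modulo_signature"] = (mod_pattern + powerball) % 10000
--
--     # MASTER SIGNATURE: Weighted combination
--     signatures["master_signature"] = (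
--         signatures["sum_signature"] * 3
--         + signatures["spread_signature"] * 2
--         + signatures["odd_even_signature"] * 5
--         + signatures["low_high_signature"] * 4
--         + signatures["prime_signature"] * 3
--         + signatures["digit_sum_signature"] * 2
--         + signatures["sequential_signature"] * 6
--     ) % 10000
--
--     return signatures
-- ===== SOURCE B (Python) =====
-- def calculate_draw_signature(whites, powerball):
--     """
--     Create a unique numerical signature for each draw.
--     One fused Horner-style pass over reversed(whites) accumulates the sum, digit
--     sums, the three binary patterns and the mod-10 pattern simultaneously,
--     instead of five separate enumerate-comprehensions with 2**i / 10**i weights.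
--     """
--
--     def is_prime(m):
--         if m < 2:
--             return False
--         i = 2
--         while i * i <= m:
--             if m % i == 0:
--                 return False
--             i += 1
--         return True
--
--     total = 0
--     ds = 0
--     odd_even = 0
--     low_high = 0
--     primes = 0
--     mod_pattern = 0
--     for n in reversed(whites):
--         total += n
--         ds += sum(int(d) for d in str(n))
--         odd_even = odd_even * 2 + (1 if n % 2 == 1 else 0)
--         low_high = low_high * 2 + (1 if n > 35 else 0)
--         primes = primes * 2 + (1 if is_prime(n) else 0)
--         mod_pattern = mod_pattern * 10 + n % 10
--
--     sorted_w = sorted(whites)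
--     sequential_count = sum(1 for i in range(4) if sorted_w[i + 1] - sorted_w[i] == 1)
--
--     sum_sig = total + powerball
--     spread_sig = max(whites) - min(whites)
--     oe_sig = odd_even + (32 if powerball % 2 == 1 else 0)
--     lh_sig = low_high + (32 if powerball > 13 else 0)
--     pr_sig = primes + (32 if is_prime(powerball) else 0)
--     ds_sig = ds + sum(int(d) for d in str(powerball))
--     seq_sig = sequential_count * 20 + powerball % 10
--     mod_sig = (mod_pattern + powerball) % 10000
--     master = (
--         sum_sig * 3
--         + spread_sig * 2
--         + oe_sig * 5
--         + lh_sig * 4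
--         + pr_sig * 3
--         + ds_sig * 2
--         + seq_sig * 6
--     ) % 10000
--     return {
--         "sum_signature": sum_sig,
--         "spread_signature": spread_sig,
--         "odd_even_signature": oe_sig,
--         "low_high_signature": lh_sig,
--         "prime_signature": pr_sig,
--         "digit_sum_signature": ds_sig,
--         "sequential_signature": seq_sig,
--         "modulo_signature": mod_sig,
--         "master_signature": master,
--     }
-- ===== Notes on version B (the rewrite author's own statement) =====
-- stated objective: alternative
-- what changed: The five separate enumerate-comprehensions over whites (odd/even, low/high and prime bit patterns with 2**i weights, digit sums, and the 10**i modulo pattern) are fused into a single Horner-style pass over reversed(whites) that accumulates all six quantities at once without per-element power computations, and is_prime's range(2, int(n**0.5)+1) scan becomes an incremental while i*i<=n loop.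
import Mathlib
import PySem

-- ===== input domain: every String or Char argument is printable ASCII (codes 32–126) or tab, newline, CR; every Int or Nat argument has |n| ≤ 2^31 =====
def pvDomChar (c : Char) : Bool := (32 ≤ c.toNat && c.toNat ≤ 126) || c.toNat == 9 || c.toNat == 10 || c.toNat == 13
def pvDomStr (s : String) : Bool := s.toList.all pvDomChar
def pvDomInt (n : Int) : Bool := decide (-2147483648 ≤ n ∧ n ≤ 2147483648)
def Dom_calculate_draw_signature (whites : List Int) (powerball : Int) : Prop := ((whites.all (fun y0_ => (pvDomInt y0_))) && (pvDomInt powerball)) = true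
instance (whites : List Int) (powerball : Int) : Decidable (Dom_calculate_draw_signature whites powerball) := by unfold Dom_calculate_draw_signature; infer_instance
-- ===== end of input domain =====

-- B fuses the five enumerate-comprehensions over whites into one Horner-style fold over the
-- reversed list and replaces the sqrt-bounded prime scan by a while i*i<=n loop (objective:
-- alternative decomposition; same cost). Pre_ excludes exactly the inputs where A raises:
-- fewer than 5 whites (IndexError), or a negative white or powerball (ValueError on int('-')).


-- ===== PORT A =====
-- is_prime: `int(n**0.5)` is ported as Nat.sqrt, which is exact for 0 ≤ n ≤ 2^31 (the
-- float sqrt of such n rounds to well within the gap to the next integer).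
def isPrimeA (n : Int) : Bool :=
  if n < 2 then false
  else (PySem.List.pyRange 2 ((Nat.sqrt n.toNat : Int) + 1)).all
    (fun i => !(PySem.Int.mod n i == 0))

-- sum(int(d) for d in str(n)); int('-') raises ValueError (the .getD 0 marks the raise;
-- Pre_ excludes negative n, so it is never taken on admitted inputs).
def strDigitSum (n : Int) : Int :=
  ((PySem.Int.toChars n).map (fun d => (PySem.Int.ofChars? [d]).getD 0)).sum

def calculate_draw_signature (whites : List Int) (powerball : Int) : List (String × Int) :=
  -- signatures = {} filled key by key; all nine keys are distinct, so the dict is the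
  -- insertion-order association list of the nine assignments.
  let sum_sig := whites.sum + powerball
  -- max()/min() raise on an empty list; .getD 0 marks the raise (Pre_ excludes it)
  let spread_sig := (PySem.List.max? whites (fun x => x)).getD 0 -
                    (PySem.List.min? whites (fun x => x)).getD 0
  -- 2**i with i ≥ 0 from enumerate: ported as 2 ^ i.toNat
  let odd_even := (((PySem.List.enumerate whites).filter
      (fun q => PySem.Int.mod q.2 2 == 1)).map (fun q => (2:Int) ^ q.1.toNat)).sum
  let oe_sig := odd_even + (if PySem.Int.mod powerball 2 == 1 then 32 else 0)
  let low_high := (((PySem.List.enumerate whites).filter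
      (fun q => q.2 > 35)).map (fun q => (2:Int) ^ q.1.toNat)).sum
  let lh_sig := low_high + (if powerball > 13 then 32 else 0)
  let primes := (((PySem.List.enumerate whites).filter
      (fun q => isPrimeA q.2)).map (fun q => (2:Int) ^ q.1.toNat)).sum
  let pr_sig := primes + (if isPrimeA powerball then 32 else 0)
  let ds_sig := (whites.map strDigitSum).sum + strDigitSum powerball
  let sorted_w := PySem.List.sorted whites (fun x => x) false
  -- sorted_w[i+1] raises IndexError when len(whites) < 5; .getD 0 marks the raise
  let sequential_count := (((PySem.List.pyRange 0 4).filter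
      (fun i => PySem.List.pyGetD sorted_w (i + 1) 0 - PySem.List.pyGetD sorted_w i 0 == 1)).map
      (fun _ => (1:Int))).sum
  let seq_sig := sequential_count * 20 + PySem.Int.mod powerball 10
  let mod_pattern := ((PySem.List.enumerate whites).map
      (fun q => PySem.Int.mod q.2 10 * (10:Int) ^ q.1.toNat)).sum
  let mod_sig := PySem.Int.mod (mod_pattern + powerball) 10000
  let master := PySem.Int.mod
      (sum_sig * 3 + spread_sig * 2 + oe_sig * 5 + lh_sig * 4 + pr_sig * 3 +
        ds_sig * 2 + seq_sig * 6) 10000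
  [("sum_signature", sum_sig), ("spread_signature", spread_sig),
   ("odd_even_signature", oe_sig), ("low_high_signature", lh_sig),
   ("prime_signature", pr_sig), ("digit_sum_signature", ds_sig),
   ("sequential_signature", seq_sig), ("modulo_signature", mod_sig),
   ("master_signature", master)]

-- ===== PORT B =====
-- is_prime's `while i * i <= m:` loop, with the iteration count as structural fuel
-- (the loop body runs at most m times, so fuel m.toNat + 1 suffices).
def primeGo (m : Int) : Nat → Int → Bool
  | 0, _ => true
  | f + 1, i =>
    if i * i ≤ m then
      (if PySem.Int.mod m i == 0 then false else primeGo m f (i + 1))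
    else true

def isPrimeB (m : Int) : Bool := if m < 2 then false else primeGo m (m.toNat + 1) 2

-- the body of B's fused loop: (total, ds, odd_even, low_high, primes, mod_pattern);
-- `ds += sum(int(d) for d in str(n))` is the same digit-sum line as A's, hence strDigitSum
def stepB (st : Int × Int × Int × Int × Int × Int) (n : Int) : Int × Int × Int × Int × Int × Int :=
  (st.1 + n,
   st.2.1 + strDigitSum n,
   st.2.2.1 * 2 + (if PySem.Int.mod n 2 == 1 then 1 else 0),
   st.2.2.2.1 * 2 + (if n > 35 then 1 else 0),
   st.2.2.2.2.1 * 2 + (if isPrimeB n then 1 else 0),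
   st.2.2.2.2.2 * 10 + PySem.Int.mod n 10)

def calculate_draw_signature_alt (whites : List Int) (powerball : Int) : List (String × Int) :=
  let st := whites.reverse.foldl stepB (0, 0, 0, 0, 0, 0)
  let sorted_w := PySem.List.sorted whites (fun x => x) false
  -- same sequential-pair line as A: sum(1 for i in range(4) if sorted_w[i+1]-sorted_w[i]==1)
  let sequential_count := (((PySem.List.pyRange 0 4).filter
      (fun i => PySem.List.pyGetD sorted_w (i + 1) 0 - PySem.List.pyGetD sorted_w i 0 == 1)).map
      (fun _ => (1:Int))).sum
  let sum_sig := st.1 + powerball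
  let spread_sig := (PySem.List.max? whites (fun x => x)).getD 0 -
                    (PySem.List.min? whites (fun x => x)).getD 0
  let oe_sig := st.2.2.1 + (if PySem.Int.mod powerball 2 == 1 then 32 else 0)
  let lh_sig := st.2.2.2.1 + (if powerball > 13 then 32 else 0)
  let pr_sig := st.2.2.2.2.1 + (if isPrimeB powerball then 32 else 0)
  let ds_sig := st.2.1 + strDigitSum powerball
  let seq_sig := sequential_count * 20 + PySem.Int.mod powerball 10
  let mod_sig := PySem.Int.mod (st.2.2.2.2.2 + powerball) 10000
  let master := PySem.Int.mod
      (sum_sig * 3 + spread_sig * 2 + oe_sig * 5 + lh_sig * 4 + pr_sig * 3 +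
        ds_sig * 2 + seq_sig * 6) 10000
  [("sum_signature", sum_sig), ("spread_signature", spread_sig),
   ("odd_even_signature", oe_sig), ("low_high_signature", lh_sig),
   ("prime_signature", pr_sig), ("digit_sum_signature", ds_sig),
   ("sequential_signature", seq_sig), ("modulo_signature", mod_sig),
   ("master_signature", master)]

-- ===== PRECONDITION & SPEC =====
-- Pre_ excludes exactly the inputs where A (and B) raises: fewer than 5 whites
-- (IndexError on sorted_w[i+1], or max/min of an empty list) and a negative white or
-- powerball (ValueError from int('-') in the digit-sum comprehension).
def Pre_calculate_draw_signature (whites : List Int) (powerball : Int) : Prop :=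
  5 ≤ whites.length ∧ (∀ n ∈ whites, 0 ≤ n) ∧ 0 ≤ powerball

instance (whites : List Int) (powerball : Int) : Decidable (Pre_calculate_draw_signature whites powerball) := by
  unfold Pre_calculate_draw_signature; infer_instance

def pvWitness_calculate_draw_signature : List Int × Int := ([10, 25, 33, 47, 61], 7)

def Spec_calculate_draw_signature (whites : List Int) (powerball : Int) (out : List (String × Int)) : Prop := out = calculate_draw_signature_alt whites powerball
instance (whites : List Int) (powerball : Int) (out : List (String × Int)) : Decidable (Spec_calculate_draw_signature whites powerball out) := by unfold Spec_calculate_draw_signature; infer_instance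

-- ===== CLAIM (what is proved, stated in full; the proofs are below) =====
def Claim_equal_calculate_draw_signature : Prop := ∀ (whites : List Int) (powerball : Int), Dom_calculate_draw_signature whites powerball → Pre_calculate_draw_signature whites powerball → Spec_calculate_draw_signature whites powerball (calculate_draw_signature whites powerball)

-- ===== LEMMAS AND PROOFS =====

-- B's tuple fold splits into six independent folds
theorem foldSplit (l : List Int) (t d o h p m : Int) :
    l.foldl stepB (t, d, o, h, p, m) =
      (l.foldl (fun a n => a + n) t,
       l.foldl (fun a n => a + strDigitSum n) d,
       l.foldl (fun a n => a * 2 + (if PySem.Int.mod n 2 == 1 then 1 else 0)) o,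
       l.foldl (fun a n => a * 2 + (if n > 35 then 1 else 0)) h,
       l.foldl (fun a n => a * 2 + (if isPrimeB n then 1 else 0)) p,
       l.foldl (fun a n => a * 10 + PySem.Int.mod n 10) m) := by
  induction l generalizing t d o h p m with
  | nil => rfl
  | cons x xs ih => simp [List.foldl_cons, stepB, ih]

-- the enumerate-weighted sum is the Horner fold over the reversed list
theorem enumHorner (v : Int → Int) (base : Int) :
    ∀ (xs : List Int) (s : Nat),
      ((PySem.List.enumerate xs (s : Int)).map (fun q => v q.2 * base ^ q.1.toNat)).sum =
        base ^ s * xs.reverse.foldl (fun a n => a * base + v n) 0 := by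
  intro xs
  induction xs with
  | nil => intro s; simp [PySem.List.enumerate]
  | cons x t ih =>
    intro s
    have h1 : ((s : Int) + 1) = ((s + 1 : Nat) : Int) := by push_cast; ring
    have h2 : ((s : Int)).toNat = s := by omega
    rw [PySem.List.enumerate.eq_2, List.map_cons, List.sum_cons, h1, ih (s + 1)]
    rw [List.reverse_cons, List.foldl_append]
    simp only [List.foldl_cons, List.foldl_nil, h2]
    ring

-- filter-then-map sum = sum of the if-weighted map
theorem filterMapSum (c : Int × Int → Bool) (g : Int × Int → Int) :
    ∀ (l : List (Int × Int)),
      ((l.filter c).map g).sum = (l.map (fun q => (if c q then 1 else 0) * g q)).sum := by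
  intro l
  induction l with
  | nil => rfl
  | cons x t ih => by_cases h : c x <;> simp [h, ih]

theorem bitHorner (p : Int → Bool) (whites : List Int) :
    (((PySem.List.enumerate whites).filter (fun q => p q.2)).map
        (fun q => (2:Int) ^ q.1.toNat)).sum =
      whites.reverse.foldl (fun a n => a * 2 + (if p n then 1 else 0)) 0 := by
  rw [filterMapSum]
  simpa using enumHorner (fun n => if p n then 1 else 0) 2 whites 0

theorem modHorner (whites : List Int) :
    ((PySem.List.enumerate whites).map
        (fun q => PySem.Int.mod q.2 10 * (10:Int) ^ q.1.toNat)).sum =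
      whites.reverse.foldl (fun a n => a * 10 + PySem.Int.mod n 10) 0 := by
  simpa using enumHorner (fun n => PySem.Int.mod n 10) 10 whites 0

theorem primeGo_eq (n : Int) (hn : 2 ≤ n) :
    ∀ (f : Nat) (i : Int), 2 ≤ i → (n + 1 - i).toNat ≤ f →
      primeGo n f i =
        (PySem.List.pyRange i ((Nat.sqrt n.toNat : Int) + 1)).all
          (fun j => !(PySem.Int.mod n j == 0)) := by
  intro f
  induction f with
  | zero =>
    intro i hi hf
    have hs := Nat.sqrt_le_self n.toNat
    rw [show PySem.List.pyRange i ((Nat.sqrt n.toNat : Int) + 1) = [] by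
      simp [PySem.List.pyRange]; omega]
    rfl
  | succ f ihf =>
    intro i hi hf
    rw [primeGo]
    by_cases h : i * i ≤ n
    · have h1 : i.toNat * i.toNat ≤ n.toNat := by
        have h2 : ((i.toNat * i.toNat : Nat) : Int) ≤ ((n.toNat : Nat) : Int) := by
          push_cast
          rw [Int.toNat_of_nonneg (by omega : (0:Int) ≤ i),
              Int.toNat_of_nonneg (by omega : (0:Int) ≤ n)]
          exact h
        exact_mod_cast h2
      have hib : i ≤ (Nat.sqrt n.toNat : Int) := by
        have := Nat.le_sqrt.mpr h1
        omega
      rw [PySem.List.pyRange_one_cons (by omega), List.all_cons]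
      by_cases hd : PySem.Int.mod n i == 0
      · simp [hd, h]
      · rw [if_pos h, if_neg hd, ihf (i + 1) (by omega) (by omega)]
        simp [hd]
    · rw [if_neg h]
      have hib : (Nat.sqrt n.toNat : Int) < i := by
        by_contra hc
        have h2 : i.toNat ≤ Nat.sqrt n.toNat := by omega
        have hs2 := Nat.sqrt_le' n.toNat
        rw [pow_two] at hs2
        have h3 : i.toNat * i.toNat ≤ n.toNat := le_trans (Nat.mul_le_mul h2 h2) hs2
        apply h
        have h4 : ((i.toNat * i.toNat : Nat) : Int) ≤ ((n.toNat : Nat) : Int) := by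
          exact_mod_cast h3
        push_cast at h4
        rw [Int.toNat_of_nonneg (by omega : (0:Int) ≤ i)] at h4
        omega
      rw [show PySem.List.pyRange i ((Nat.sqrt n.toNat : Int) + 1) = [] by
        simp [PySem.List.pyRange]; omega]
      rfl

theorem isPrime_agree (n : Int) : isPrimeA n = isPrimeB n := by
  unfold isPrimeA isPrimeB
  by_cases h : n < 2
  · simp [h]
  · rw [if_neg h, if_neg h, primeGo_eq n (by omega) (n.toNat + 1) 2 (by norm_num) (by omega)]

-- ===== VERDICT (by name: the statement is the Claim_ definition above) =====
theorem calculate_draw_signature_spec : Claim_equal_calculate_draw_signature := by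
  intro whites powerball _ hpre
  unfold Spec_calculate_draw_signature
  have hAB : isPrimeA = isPrimeB := funext isPrime_agree
  have e_total : whites.sum = whites.reverse.foldl (fun a n => a + n) 0 := by
    simpa using (PySem.List.foldl_add whites.reverse (fun n => n) 0).symm
  have e_ds : (whites.map strDigitSum).sum =
      whites.reverse.foldl (fun a n => a + strDigitSum n) 0 := by
    rw [PySem.List.foldl_add whites.reverse strDigitSum 0, List.map_reverse, List.sum_reverse]
    ring
  simp only [calculate_draw_signature, calculate_draw_signature_alt, foldSplit, hAB,
    modHorner, e_total, e_ds]
  rw [bitHorner (fun n => PySem.Int.mod n 2 == 1) whites,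
      bitHorner (fun n => decide (n > 35)) whites,
      bitHorner isPrimeB whites]
  simp
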